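-- pv_equiv track=rewrite | github.com/PrecisionTakeAI/Jurion | backend/services/conflict_service.py | _generate_conflict_recommendations
-- ===== SOURCE A (Python) =====
-- from typing import Dict, List, Optional, Any
--
-- def _generate_conflict_recommendations(conflicts: List[Dict[str, Any]]) -> List[str]:
--     """Generate recommendations based on conflicts found"""
--
--     if not conflicts:
--         return ["No conflicts detected - proceed with case creation"]
--
--     recommendations = []
--
--     # Count conflict types
--     high_severity = len([c for c in conflicts if c.get("severity") == "high"])
--     medium_severity = len([c for c in conflicts if c.get("severity") == "medium"])
--
--     if high_severity > 0:
--         recommendations.append("CRITICAL: High-severity conflicts detected - do not proceed without senior partner approval")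
--         recommendations.append("Conduct thorough conflict waiver analysis before proceeding")
--         recommendations.append("Document all conflict checks and approvals in case file")
--
--     if medium_severity > 0:
--         recommendations.append("Medium-severity conflicts detected - verify client relationships")
--         recommendations.append("Consider conflict waivers if proceeding is appropriate")
--
--     # Specific recommendations based on conflict types
--     conflict_types = [c.get("conflict_type") for c in conflicts]
--
--     if "same_parties" in conflict_types:
--         recommendations.append("Same parties found in existing case - check if this is a related matter")
--
--     if "role_reversal" in conflict_types:
--         recommendations.append("Party role reversal detected - ensure this is not a related cross-claim")
--
--     if "similar_match" in conflict_types: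
--         recommendations.append("Similar names detected - verify party identities with additional information")
--
--     return recommendations
-- ===== SOURCE B (Python) =====
-- from typing import Dict, List, Optional, Any
--
-- # Declarative rule table: each rule fires when the (field, value) fact is present.
-- _RULES = [
--     (("severity", "high"), [
--         "CRITICAL: High-severity conflicts detected - do not proceed without senior partner approval",
--         "Conduct thorough conflict waiver analysis before proceeding",
--         "Document all conflict checks and approvals in case file",
--     ]),
--     (("severity", "medium"), [
--         "Medium-severity conflicts detected - verify client relationships",
--         "Consider conflict waivers if proceeding is appropriate",
--     ]),
--     (("conflict_type", "same_parties"), [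
--         "Same parties found in existing case - check if this is a related matter",
--     ]),
--     (("conflict_type", "role_reversal"), [
--         "Party role reversal detected - ensure this is not a related cross-claim",
--     ]),
--     (("conflict_type", "similar_match"), [
--         "Similar names detected - verify party identities with additional information",
--     ]),
-- ]
--
-- def _generate_conflict_recommendations(conflicts: List[Dict[str, Any]]) -> List[str]:
--     """Generate recommendations based on conflicts found"""
--     if not conflicts:
--         return ["No conflicts detected - proceed with case creation"]
--     facts = {(f, c.get(f)) for c in conflicts for f in ("severity", "conflict_type")}
--     return [msg for key, msgs in _RULES if key in facts for msg in msgs]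
-- ===== Notes on version B (the rewrite author's own statement) =====
-- stated objective: alternative
-- what changed: Replaces A's per-condition comprehension passes and if/append chain by a declarative rule table keyed by (field, value) together with a single pass that collects the set of (field, value) facts present; the output is produced by one comprehension over the table, so severity and conflict-type rules share one mechanism.
import Mathlib
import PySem

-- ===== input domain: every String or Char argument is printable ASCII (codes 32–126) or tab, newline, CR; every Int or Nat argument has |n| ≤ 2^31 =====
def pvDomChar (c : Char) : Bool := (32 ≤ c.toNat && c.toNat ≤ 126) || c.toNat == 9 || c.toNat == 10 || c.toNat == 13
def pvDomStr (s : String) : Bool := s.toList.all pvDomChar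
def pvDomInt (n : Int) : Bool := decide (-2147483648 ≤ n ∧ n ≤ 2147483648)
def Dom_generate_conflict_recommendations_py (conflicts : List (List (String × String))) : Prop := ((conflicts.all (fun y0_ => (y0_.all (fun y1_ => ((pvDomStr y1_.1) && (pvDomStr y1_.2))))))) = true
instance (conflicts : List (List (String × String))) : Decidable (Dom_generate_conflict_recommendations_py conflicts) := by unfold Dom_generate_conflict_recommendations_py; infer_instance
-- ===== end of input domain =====

-- B replaces A's per-condition passes and if/append chain by a rule table keyed by
-- (field, value) plus one pass collecting the set of (field, value) facts present
-- (objective: alternative, data-driven decomposition).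

-- ===== PORT A =====
def generate_conflict_recommendations_py (conflicts : List (List (String × String))) : List String :=
  if conflicts = [] then ["No conflicts detected - proceed with case creation"]
  else
    let recommendations : List String := []
    let high_severity := (conflicts.filter (fun c => (PySem.Dict.mk c).get? "severity" == some "high")).length
    let medium_severity := (conflicts.filter (fun c => (PySem.Dict.mk c).get? "severity" == some "medium")).length
    let recommendations := if 0 < high_severity then
        recommendations ++ ["CRITICAL: High-severity conflicts detected - do not proceed without senior partner approval",
                            "Conduct thorough conflict waiver analysis before proceeding",
                            "Document all conflict checks and approvals in case file"]
      else recommendations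
    let recommendations := if 0 < medium_severity then
        recommendations ++ ["Medium-severity conflicts detected - verify client relationships",
                            "Consider conflict waivers if proceeding is appropriate"]
      else recommendations
    let conflict_types := conflicts.map (fun c => (PySem.Dict.mk c).get? "conflict_type")
    let recommendations := if (some "same_parties") ∈ conflict_types then
        recommendations ++ ["Same parties found in existing case - check if this is a related matter"]
      else recommendations
    let recommendations := if (some "role_reversal") ∈ conflict_types then
        recommendations ++ ["Party role reversal detected - ensure this is not a related cross-claim"]
      else recommendations
    let recommendations := if (some "similar_match") ∈ conflict_types then
        recommendations ++ ["Similar names detected - verify party identities with additional information"]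
      else recommendations
    recommendations

-- ===== PORT B =====
-- the module-level rule table _RULES of Source B
def pvRules : List ((String × Option String) × List String) :=
  [(("severity", some "high"),
    ["CRITICAL: High-severity conflicts detected - do not proceed without senior partner approval",
     "Conduct thorough conflict waiver analysis before proceeding",
     "Document all conflict checks and approvals in case file"]),
   (("severity", some "medium"),
    ["Medium-severity conflicts detected - verify client relationships",
     "Consider conflict waivers if proceeding is appropriate"]),
   (("conflict_type", some "same_parties"),
    ["Same parties found in existing case - check if this is a related matter"]),
   (("conflict_type", some "role_reversal"),
    ["Party role reversal detected - ensure this is not a related cross-claim"]),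
   (("conflict_type", some "similar_match"),
    ["Similar names detected - verify party identities with additional information"])]

def generate_conflict_recommendations_py_alt (conflicts : List (List (String × String))) : List String :=
  if conflicts = [] then ["No conflicts detected - proceed with case creation"]
  else
    -- facts = {(f, c.get(f)) for c in conflicts for f in ("severity", "conflict_type")}
    let facts : PySem.Set (String × Option String) :=
      conflicts.foldl (fun s c =>
        (["severity", "conflict_type"]).foldl
          (fun s f => PySem.Set.add s (f, (PySem.Dict.mk c).get? f)) s) PySem.Set.empty
    -- [msg for key, msgs in _RULES if key in facts for msg in msgs]
    pvRules.flatMap (fun r => if r.1 ∈ facts then r.2 else [])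

-- ===== PRECONDITION & SPEC =====
def Spec_generate_conflict_recommendations_py (conflicts : List (List (String × String))) (out : List String) : Prop := out = generate_conflict_recommendations_py_alt conflicts
instance (conflicts : List (List (String × String))) (out : List String) : Decidable (Spec_generate_conflict_recommendations_py conflicts out) := by unfold Spec_generate_conflict_recommendations_py; infer_instance

-- ===== CLAIM (what is proved, stated in full; the proofs are below) =====
def Claim_equal_generate_conflict_recommendations_py : Prop := ∀ (conflicts : List (List (String × String))), Dom_generate_conflict_recommendations_py conflicts → Spec_generate_conflict_recommendations_py conflicts (generate_conflict_recommendations_py conflicts)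

-- ===== LEMMAS AND PROOFS =====

lemma pvFacts_mem (cs : List (List (String × String))) (s : PySem.Set (String × Option String))
    (x : String × Option String) :
    x ∈ cs.foldl (fun s c =>
        (["severity", "conflict_type"]).foldl
          (fun s f => PySem.Set.add s (f, (PySem.Dict.mk c).get? f)) s) s
      ↔ x ∈ s ∨ ∃ c ∈ cs, x = ("severity", (PySem.Dict.mk c).get? "severity")
                        ∨ x = ("conflict_type", (PySem.Dict.mk c).get? "conflict_type") := by
  induction cs generalizing s with
  | nil => simp
  | cons c cs ih =>
    rw [List.foldl_cons, ih]
    simp only [List.foldl_cons, List.foldl_nil, PySem.Set.mem_add, List.mem_cons]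
    constructor
    · rintro (((h | h) | h) | ⟨c', hc', h⟩)
      · exact Or.inl h
      · exact Or.inr ⟨c, Or.inl rfl, Or.inl h⟩
      · exact Or.inr ⟨c, Or.inl rfl, Or.inr h⟩
      · exact Or.inr ⟨c', Or.inr hc', h⟩
    · rintro (h | ⟨c', (rfl | hc'), h⟩)
      · exact Or.inl (Or.inl (Or.inl h))
      · rcases h with h | h
        · exact Or.inl (Or.inl (Or.inr h))
        · exact Or.inl (Or.inr h)
      · exact Or.inr ⟨c', hc', h⟩

lemma pvFacts_key (cs : List (List (String × String))) (f : String) (v : Option String)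
    (hf : f = "severity" ∨ f = "conflict_type") :
    ((f, v) ∈ cs.foldl (fun s c =>
        (["severity", "conflict_type"]).foldl
          (fun s g => PySem.Set.add s (g, (PySem.Dict.mk c).get? g)) s) PySem.Set.empty)
      ↔ cs.any (fun c => (PySem.Dict.mk c).get? f == v) = true := by
  rw [pvFacts_mem]
  rcases hf with rfl | rfl
  · simp only [PySem.Set.empty, List.not_mem_nil, false_or, Prod.mk.injEq,
      List.any_eq_true, beq_iff_eq]
    constructor
    · rintro ⟨c, hc, ⟨-, rfl⟩ | ⟨h, -⟩⟩
      · exact ⟨c, hc, rfl⟩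
      · exact absurd h (by decide)
    · rintro ⟨c, hc, rfl⟩; exact ⟨c, hc, Or.inl ⟨trivial, rfl⟩⟩
  · simp only [PySem.Set.empty, List.not_mem_nil, false_or, Prod.mk.injEq,
      List.any_eq_true, beq_iff_eq]
    constructor
    · rintro ⟨c, hc, ⟨h, -⟩ | ⟨-, rfl⟩⟩
      · exact absurd h (by decide)
      · exact ⟨c, hc, rfl⟩
    · rintro ⟨c, hc, rfl⟩; exact ⟨c, hc, Or.inr ⟨trivial, rfl⟩⟩

lemma pv_count_pos_iff (cs : List (List (String × String))) (p : List (String × String) → Bool) :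
    (0 < (cs.filter p).length) ↔ (cs.any p = true) := by
  simp [List.length_pos_iff, List.any_eq_true, List.filter_eq_nil_iff]

-- ===== VERDICT (by name: the statement is the Claim_ definition above) =====
theorem generate_conflict_recommendations_py_spec : Claim_equal_generate_conflict_recommendations_py := by
  intro conflicts _
  unfold Spec_generate_conflict_recommendations_py
  unfold generate_conflict_recommendations_py generate_conflict_recommendations_py_alt
  by_cases hnil : conflicts = []
  · simp [hnil]
  · simp only [hnil, if_false]
    have hH := pvFacts_key conflicts "severity" (some "high") (Or.inl rfl)
    have hM := pvFacts_key conflicts "severity" (some "medium") (Or.inl rfl)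
    have h1 := pvFacts_key conflicts "conflict_type" (some "same_parties") (Or.inr rfl)
    have h2 := pvFacts_key conflicts "conflict_type" (some "role_reversal") (Or.inr rfl)
    have h3 := pvFacts_key conflicts "conflict_type" (some "similar_match") (Or.inr rfl)
    simp only [pvRules, List.flatMap_cons, List.flatMap_nil, List.append_nil]
    simp only [pv_count_pos_iff]
    simp only [hH, hM, h1, h2, h3, List.mem_map, List.any_eq_true, beq_iff_eq]
    split_ifs <;> simp_all
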